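-- pv_equiv track=rewrite | github.com/akissinger/chyp | chyp/term.py | split_perm
-- ===== SOURCE A (Python) =====
-- from typing import List
--
-- def split_perm(perm: List[int]) -> List[List[int]]:
--     """Split a permutation into a tensor product of independent permuations
--     """
--     perms = []
--     rest = perm
--
--     while rest != []:
--         m = 0
--         for i, x in enumerate(rest):
--             m = max(x, m)
--             if m <= i:
--                 perms.append(rest[:i+1])
--                 rest = [y-(i+1) for y in rest[i+1:]]
--                 break
--     return perms
-- ===== SOURCE B (Python) =====
-- def split_perm(perm):
--     """Split a permutation into a tensor product of independent permutations
--     (single left-to-right pass with a running maximum and block offset)."""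
--     perms = []
--     block = []
--     offset = 0
--     m = 0
--     for i, x in enumerate(perm):
--         block.append(x - offset)
--         if x > m:
--             m = x
--         if m <= i:
--             perms.append(block)
--             block = []
--             offset = i + 1
--             m = i + 1
--     return perms
-- ===== Notes on version B (the rewrite author's own statement) =====
-- stated objective: alternative
-- what changed: Replaces the while-loop that rescans and rebuilds (shift-maps and slices) the remaining list once per emitted block with a single left-to-right pass keeping a running maximum, a block accumulator and a block-start offset, emitting a block whenever the running maximum is at most the current index.
import Mathlib
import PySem

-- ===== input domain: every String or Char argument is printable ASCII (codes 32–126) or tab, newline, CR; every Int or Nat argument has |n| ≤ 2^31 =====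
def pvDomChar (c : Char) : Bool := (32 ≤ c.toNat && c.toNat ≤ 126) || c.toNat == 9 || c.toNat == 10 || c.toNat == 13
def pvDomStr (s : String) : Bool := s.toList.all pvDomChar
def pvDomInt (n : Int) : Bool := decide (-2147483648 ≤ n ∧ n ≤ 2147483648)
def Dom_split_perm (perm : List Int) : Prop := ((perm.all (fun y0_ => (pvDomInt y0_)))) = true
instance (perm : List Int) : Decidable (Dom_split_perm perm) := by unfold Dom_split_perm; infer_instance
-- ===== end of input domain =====

-- B replaces A's while-loop (which rescans and rebuilds the remaining list once per emitted block)
-- by a single left-to-right pass with a running maximum and a block-start offset.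

-- ===== PORT A =====
-- inner `for i, x in enumerate(rest): m = max(x, m); if m <= i: … break`
-- returns the pair (appended block, new rest) at the break, `none` if the for-loop completes without break
def splitPermFor : List (Int × Int) → Int → List Int → Option (List Int × List Int)
  | [], _, _ => none
  | (i, x) :: tl, m, rest =>
      let m := max x m
      if m ≤ i then
        some (PySem.List.slice rest (some 0) (some (i + 1)),
              (PySem.List.slice rest (some (i + 1)) none).map (fun y => y - (i + 1)))
      else splitPermFor tl m rest

-- `while rest != []: …`; fuel bounds the number of iterations only to make the loop total:
-- when the inner for-loop finds no break Python loops forever (rest unchanged); we return perms then —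
-- such inputs are excluded by Pre_split_perm.
def splitPermWhile : Nat → List (List Int) → List Int → List (List Int)
  | 0, perms, _ => perms
  | fuel + 1, perms, rest =>
      if rest = [] then perms
      else
        match splitPermFor (PySem.List.enumerate rest 0) 0 rest with
        | none => perms
        | some (blk, rest') => splitPermWhile fuel (perms ++ [blk]) rest'

def split_perm (perm : List Int) : List (List Int) :=
  splitPermWhile (perm.length + 1) [] perm

-- ===== PORT B =====
-- one step of B's for-loop; state = (perms, block, offset, m)
def splitPermStep (st : List (List Int) × List Int × Int × Int) (p : Int × Int) :
    List (List Int) × List Int × Int × Int :=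
  let (perms, block, offset, m) := st
  let (i, x) := p
  let block := block ++ [x - offset]
  let m := if x > m then x else m
  if m ≤ i then (perms ++ [block], [], i + 1, i + 1) else (perms, block, offset, m)

def split_perm_alt (perm : List Int) : List (List Int) :=
  ((PySem.List.enumerate perm 0).foldl splitPermStep ([], [], 0, 0)).1

-- ===== PRECONDITION & SPEC =====
-- Pre_ excludes exactly the inputs on which A never returns: if some element exceeds length-1 the
-- inner for-loop eventually completes without break and A's while-loop runs forever.
def Pre_split_perm (perm : List Int) : Prop :=
  ∀ x ∈ perm, x ≤ (perm.length : Int) - 1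
instance (perm : List Int) : Decidable (Pre_split_perm perm) := by
  unfold Pre_split_perm; infer_instance

def pvWitness_split_perm : List Int := [1, 0, 2, 3]

def Spec_split_perm (perm : List Int) (out : List (List Int)) : Prop := out = split_perm_alt perm
instance (perm : List Int) (out : List (List Int)) : Decidable (Spec_split_perm perm out) := by
  unfold Spec_split_perm; infer_instance

-- ===== CLAIM (what is proved, stated in full; the proofs are below) =====
def Claim_equal_split_perm : Prop :=
  ∀ (perm : List Int), Dom_split_perm perm → Pre_split_perm perm →
    Spec_split_perm perm (split_perm perm)

-- ===== LEMMAS AND PROOFS =====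

-- the inner for-loop finds a break whenever all (shifted) elements are ≤ length - 1
theorem splitPermFor_isSome (t : List Int) :
    ∀ (j : Nat) (m : Int) (rest : List Int), t ≠ [] → 0 ≤ m →
      m ≤ (j : Int) + t.length - 1 → (∀ x ∈ t, x ≤ (j : Int) + t.length - 1) →
      (splitPermFor (PySem.List.enumerate t (j : Int)) m rest).isSome := by
  induction t with
  | nil => intro _ _ _ h; exact absurd rfl h
  | cons x t' ih =>
    intro j m rest _ hm0 hm hall
    rw [PySem.List.enumerate_cons]
    simp only [splitPermFor]
    by_cases hb : max x m ≤ (j : Int)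
    · simp [hb]
    · have hx := hall x (by simp)
      cases t' with
      | nil => simp at hx hm; omega
      | cons y t'' =>
        simp only [hb]
        have : ((j : Int) + 1) = ((j + 1 : Nat) : Int) := by push_cast; ring
        rw [this]
        apply ih (j + 1) (max x m) rest (by simp)
        · omega
        · simp only [List.length_cons] at hm hx ⊢; push_cast at hm hx ⊢; omega
        · intro z hz
          have := hall z (List.mem_cons_of_mem _ hz)
          simp only [List.length_cons] at this ⊢; push_cast at this ⊢; omega

-- core correspondence: B's fold, scanned from position s+k inside the block that started at s,
-- tracks A's inner for-loop on the shifted stage list; at the break both emit the same block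
-- and B's state is exactly a fresh block start for the next stage.
theorem fold_for_corr (t : List Int) :
    ∀ (k s : Nat) (mA : Int) (acc : List (List Int)) (blk l : List Int)
      (blkA restA : List Int),
      l.drop k = t → blk = (l.take k).map (fun y => y - (s : Int)) →
      splitPermFor (PySem.List.enumerate (t.map (fun y => y - (s : Int))) (k : Int)) mA
          (l.map (fun y => y - (s : Int))) = some (blkA, restA) →
      ∃ i : Nat, k ≤ i ∧ i < l.length ∧
        blkA = (l.take (i + 1)).map (fun y => y - (s : Int)) ∧
        restA = (l.drop (i + 1)).map (fun y => y - ((s + i + 1 : Nat) : Int)) ∧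
        (PySem.List.enumerate t ((s + k : Nat) : Int)).foldl splitPermStep
            (acc, blk, (s : Int), mA + (s : Int))
          = (PySem.List.enumerate (l.drop (i + 1)) ((s + i + 1 : Nat) : Int)).foldl splitPermStep
              (acc ++ [blkA], [], ((s + i + 1 : Nat) : Int), ((s + i + 1 : Nat) : Int)) := by
  induction t with
  | nil => intro k s mA acc blk l blkA restA _ _ h; simp [splitPermFor] at h
  | cons x t' ih =>
    intro k s mA acc blk l blkA restA hdrop hblk hfor
    have hklen : k < l.length := by
      by_contra h
      rw [List.drop_eq_nil_of_le (by omega)] at hdrop; exact (List.cons_ne_nil _ _) hdrop.symm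
    have hlk : l.take (k + 1) = l.take k ++ [x] := by
      have h1 : l = l.take k ++ l.drop k := (List.take_append_drop k l).symm
      have h2 : (l.take k).length = k := List.length_take_of_le (by omega)
      rw [List.take_add_one]
      have : l[k]? = some x := by
        conv_lhs => rw [h1]
        rw [List.getElem?_append_right (by omega), hdrop]
        simp [h2]
      simp [this]
    have ht' : l.drop (k + 1) = t' := by
      rw [← List.tail_drop, hdrop, List.tail_cons]
    simp only [List.map_cons, PySem.List.enumerate_cons] at hfor
    simp only [splitPermFor] at hfor
    rw [PySem.List.enumerate_cons]
    simp only [List.foldl_cons]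
    have hstep : splitPermStep (acc, blk, (s : Int), mA + (s : Int)) (((s + k : Nat) : Int), x)
        = if max (x - (s : Int)) mA ≤ (k : Int)
          then (acc ++ [blk ++ [x - (s : Int)]], [], ((s + k : Nat) : Int) + 1, ((s + k : Nat) : Int) + 1)
          else (acc, blk ++ [x - (s : Int)], (s : Int), max (x - (s : Int)) mA + (s : Int)) := by
      simp only [splitPermStep]
      have h1 : (if x > mA + (s : Int) then x else mA + (s : Int)) = max (x - (s : Int)) mA + (s : Int) := by
        rcases le_or_gt x (mA + (s : Int)) with h | h
        · rw [if_neg (by omega)]; omega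
        · rw [if_pos h]; omega
      rw [h1]
      have h2 : (max (x - (s : Int)) mA + (s : Int) ≤ ((s + k : Nat) : Int)) ↔ max (x - (s : Int)) mA ≤ (k : Int) := by
        push_cast; omega
      by_cases hc : max (x - (s : Int)) mA ≤ (k : Int)
      · rw [if_pos (h2.mpr hc), if_pos hc]
      · rw [if_neg (fun h => hc (h2.mp h)), if_neg hc]
    by_cases hc : max (x - (s : Int)) mA ≤ (k : Int)
    · -- break fires here: i = k
      rw [if_pos hc] at hfor
      injection hfor with hfor; injection hfor with h1 h2
      refine ⟨k, le_refl k, hklen, ?_, ?_, ?_⟩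
      · rw [← h1]
        have : ((k : Int) + 1) = ((k + 1 : Nat) : Int) := by push_cast; ring
        rw [this, PySem.List.slice_zero_start, PySem.List.slice_to_natCast, ← List.map_take]
      · rw [← h2]
        have : ((k : Int) + 1) = ((k + 1 : Nat) : Int) := by push_cast; ring
        rw [this, PySem.List.slice_from_natCast, ← List.map_drop, List.map_map]
        congr 1; funext y; simp only [Function.comp_apply]; push_cast; ring
      · rw [hstep, if_pos hc, ← h1]
        have hblkA : PySem.List.slice (l.map (fun y => y - (s : Int))) (some 0) (some ((k : Int) + 1))
            = blk ++ [x - (s : Int)] := by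
          have : ((k : Int) + 1) = ((k + 1 : Nat) : Int) := by push_cast; ring
          rw [this, PySem.List.slice_zero_start, PySem.List.slice_to_natCast, ← List.map_take, hlk,
            List.map_append, hblk]
          simp
        rw [hblkA, ht']
        have hcast : ((s + k : Nat) : Int) + 1 = ((s + k + 1 : Nat) : Int) := by push_cast; ring
        rw [hcast]
    · -- no break: continue the scan
      rw [if_neg hc] at hfor
      rw [hstep, if_neg hc]
      have hcast : ((k : Int) + 1) = ((k + 1 : Nat) : Int) := by push_cast; ring
      rw [hcast] at hfor
      obtain ⟨i, hki, hil, hb, hr, heq⟩ :=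
        ih (k + 1) s (max (x - (s : Int)) mA) acc (blk ++ [x - (s : Int)]) l blkA restA
          ht' (by rw [hlk, List.map_append, hblk]; simp) hfor
      refine ⟨i, by omega, hil, hb, hr, ?_⟩
      have hcast2 : ((s + k : Nat) : Int) + 1 = ((s + (k + 1) : Nat) : Int) := by push_cast; ring
      rw [hcast2, heq]

-- stage lemma: from a fresh block start at position s, B's fold finishes exactly like A's while-loop
-- on the shifted remaining list, provided the fuel exceeds its length and the break always exists.
theorem fold_while_corr (fuel : Nat) :
    ∀ (l perm : List Int) (s : Nat) (acc : List (List Int)),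
      perm.drop s = l → l.length < fuel →
      (∀ x ∈ l, x - (s : Int) ≤ (l.length : Int) - 1) →
      ((PySem.List.enumerate l (s : Int)).foldl splitPermStep (acc, [], (s : Int), (s : Int))).1
        = splitPermWhile fuel acc (l.map (fun y => y - (s : Int))) := by
  induction fuel with
  | zero => intro l perm s acc _ h; omega
  | succ f ihf =>
    intro l perm s acc hdrop hfuel hpre
    cases l with
    | nil => simp [splitPermWhile, PySem.List.enumerate]
    | cons a l' =>
      set l := a :: l' with hl
      have hne : l.map (fun y => y - (s : Int)) ≠ [] := by simp [hl]
      have hsome := splitPermFor_isSome (l.map (fun y => y - (s : Int))) 0 0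
        (l.map (fun y => y - (s : Int))) hne le_rfl
        (by simp [hl])
        (by intro z hz
            obtain ⟨y, hy, rfl⟩ := List.mem_map.mp hz
            have := hpre y hy
            simp only [List.length_map]; omega)
      obtain ⟨⟨blkA, restA⟩, hfor⟩ := Option.isSome_iff_exists.mp hsome
      have hfor0 : splitPermFor (PySem.List.enumerate (l.map (fun y => y - (s : Int))) ((0 : Nat) : Int)) 0
          (l.map (fun y => y - (s : Int))) = some (blkA, restA) := by
        simpa using hfor
      obtain ⟨i, _, hil, hb, hr, heq⟩ :=
        fold_for_corr l 0 s 0 acc [] l blkA restA (by simp) (by simp) hfor0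
      have hfor1 : splitPermFor (PySem.List.enumerate (l.map (fun y => y - (s : Int))) 0) 0
          (l.map (fun y => y - (s : Int))) = some (blkA, restA) := by
        simpa using hfor
      have hA : splitPermWhile (f + 1) acc (l.map (fun y => y - (s : Int)))
          = splitPermWhile f (acc ++ [blkA]) restA := by
        simp only [splitPermWhile, if_neg hne, hfor1]
      rw [hA]
      simp only [Nat.add_zero, zero_add] at heq
      rw [heq]
      have hdrop' : perm.drop (s + i + 1) = l.drop (i + 1) := by
        rw [← hdrop, List.drop_drop, Nat.add_assoc]
      have hlen' : (l.drop (i + 1)).length < f := by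
        rw [List.length_drop]; simp only [hl, List.length_cons] at hfuel hil ⊢; omega
      have hpre' : ∀ x ∈ l.drop (i + 1), x - ((s + i + 1 : Nat) : Int) ≤ ((l.drop (i + 1)).length : Int) - 1 := by
        intro x hx
        have := hpre x (List.mem_of_mem_drop hx)
        rw [List.length_drop]; push_cast; omega
      have := ihf (l.drop (i + 1)) perm (s + i + 1) (acc ++ [blkA]) hdrop' hlen' hpre'
      rw [this, ← hr]

-- ===== VERDICT (by name: the statement is the Claim_ definition above) =====
theorem split_perm_spec : Claim_equal_split_perm := by
  intro perm _ hpre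
  unfold Spec_split_perm split_perm split_perm_alt
  have h := fold_while_corr (perm.length + 1) perm perm 0 [] (by simp) (by omega)
    (by intro x hx; have := hpre x hx; simpa using this)
  have hmap : perm.map (fun y => y - ((0 : Nat) : Int)) = perm := by simp
  rw [hmap] at h
  simpa using h.symm
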